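-- pv_equiv track=rewrite | github.com/yewon129/Baekjoon | 프로그래머스/lv2/42584. 주식가격/주식가격.py | solution
-- ===== SOURCE A (Python) =====
-- def solution(prices):
--     N = len(prices)
--     answer = [0] * N
--     i = 0
--     for i in range(N-1):
--         for j in range(i+1, N):
--             answer[i] += 1
--             if prices[i] > prices[j]:
--                 break
--     answer[-1] = 0
--     return answer
-- ===== SOURCE B (Python) =====
-- def solution(prices):
--     n = len(prices)
--     answer = [0] * n
--     stack = []
--     for j, p in enumerate(prices):
--         while stack and prices[stack[-1]] > p:
--             t = stack.pop()
--             answer[t] = j - t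
--         stack.append(j)
--     for t in stack:
--         answer[t] = n - 1 - t
--     return answer
-- ===== Notes on version B (the rewrite author's own statement) =====
-- stated objective: faster
-- what changed: Replaced the per-index inner scan (for each i, walk forward until a smaller price) by a single left-to-right pass with a monotonic stack of indices that are popped when a smaller price arrives, turning O(n^2) into O(n).
import Mathlib
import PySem

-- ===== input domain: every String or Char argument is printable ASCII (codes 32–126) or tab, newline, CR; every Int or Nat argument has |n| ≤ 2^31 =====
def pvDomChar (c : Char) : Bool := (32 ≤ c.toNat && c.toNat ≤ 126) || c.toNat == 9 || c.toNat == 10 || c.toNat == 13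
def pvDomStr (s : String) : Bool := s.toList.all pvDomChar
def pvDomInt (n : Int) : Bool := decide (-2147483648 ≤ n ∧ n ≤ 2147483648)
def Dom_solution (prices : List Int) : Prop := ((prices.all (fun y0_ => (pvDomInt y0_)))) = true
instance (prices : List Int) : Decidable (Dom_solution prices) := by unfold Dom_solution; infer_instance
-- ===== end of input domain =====

-- B replaces A's quadratic per-index forward scan by a single-pass monotonic index stack; A=B proved on nonempty lists (A raises IndexError on the empty list).


-- ===== PORT A =====
-- inner loop: for j in js: answer[i] += 1; if prices[i] > prices[j]: break
def solutionInnerA (prices : List Int) (i : Int) : List Int → List Int → List Int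
  | answer, [] => answer
  | answer, j :: rest =>
    let answer := PySem.List.pySetD answer i (PySem.List.pyGetD answer i 0 + 1)
    if PySem.List.pyGetD prices i 0 > PySem.List.pyGetD prices j 0 then answer
    else solutionInnerA prices i answer rest

def solution (prices : List Int) : List Int :=
  let N : Int := (prices.length : Int)
  let answer : List Int := List.replicate prices.length 0
  let answer := (PySem.List.pyRange 0 (N - 1) 1).foldl
      (fun answer i => solutionInnerA prices i answer (PySem.List.pyRange (i + 1) N 1)) answer
  PySem.List.pySetD answer (-1) 0

-- ===== PORT B =====
-- while stack and prices[stack[-1]] > p: t = stack.pop(); answer[t] = j - t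
-- (stack is kept top-first: append = cons, stack[-1] = head)
def popLoopB (prices : List Int) (j p : Int) : List Int → List Int → List Int × List Int
  | answer, [] => (answer, [])
  | answer, t :: stack' =>
    if PySem.List.pyGetD prices t 0 > p then
      popLoopB prices j p (PySem.List.pySetD answer t (j - t)) stack'
    else (answer, t :: stack')

def solution_alt (prices : List Int) : List Int :=
  let n : Int := (prices.length : Int)
  let answer : List Int := List.replicate prices.length 0
  let st := (PySem.List.enumerate prices 0).foldl
      (fun (st : List Int × List Int) jp =>
        let st' := popLoopB prices jp.1 jp.2 st.1 st.2
        (st'.1, jp.1 :: st'.2)) (answer, [])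
  -- for t in stack: answer[t] = n - 1 - t   (bottom-to-top = reverse of our top-first list)
  st.2.reverse.foldl (fun answer t => PySem.List.pySetD answer t (n - 1 - t)) st.1

-- ===== PRECONDITION & SPEC =====
-- Pre_ excludes only the empty list, on which A raises IndexError at its final assignment to the last answer slot.
def Pre_solution (prices : List Int) : Prop := prices ≠ []
instance (prices : List Int) : Decidable (Pre_solution prices) := by unfold Pre_solution; infer_instance
def pvWitness_solution : List Int := [1, 2, 3, 2, 3]

def Spec_solution (prices : List Int) (out : List Int) : Prop := out = solution_alt prices
instance (prices : List Int) (out : List Int) : Decidable (Spec_solution prices out) := by unfold Spec_solution; infer_instance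

-- ===== CLAIM (what is proved, stated in full; the proofs are below) =====
def Claim_equal_solution : Prop := ∀ (prices : List Int), Dom_solution prices → Pre_solution prices → Spec_solution prices (solution prices)

-- ===== LEMMAS AND PROOFS =====

-- price at Nat index
def pvG (prices : List Int) (t : Nat) : Int := prices.getD t 0

-- the count A's inner loop computes, over a Nat index list
def pvCnt (prices : List Int) (p : Int) : List Nat → Int
  | [] => 0
  | j :: rest => if p > pvG prices j then 1 else 1 + pvCnt prices p rest

-- "no price drop for index t anywhere in (t, j)"
def pvOk (prices : List Int) (t j : Nat) : Bool :=
  (List.range' (t + 1) (j - (t + 1))).all (fun m => decide (pvG prices t ≤ pvG prices m))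

-- the common value of answer[t]
def pvF (prices : List Int) (t : Nat) : Int :=
  pvCnt prices (pvG prices t) (List.range' (t + 1) (prices.length - (t + 1)))


-- getD of a set at a valid index
theorem pvGetD_set (xs : List Int) (t : Nat) (v : Int) (h : t < xs.length) (s : Nat) :
    (xs.set t v).getD s 0 = if s = t then v else xs.getD s 0 := by
  rcases eq_or_ne s t with rfl | hne
  · simp [List.getD_eq_getElem?_getD, h]
  · simp [List.getD_eq_getElem?_getD, List.getElem?_set_ne (Ne.symm hne), hne]

-- a Python range between Nat endpoints is a cast of a Nat range'
theorem pvPyRange_cast (a b : Nat) :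
    PySem.List.pyRange (a : Int) (b : Int) 1 = (List.range' a (b - a)).map (fun t : Nat => (t : Int)) := by
  rw [PySem.List.pyRange_one, List.range'_eq_map_range]
  have : ((b : Int) - (a : Int)).toNat = b - a := by omega
  rw [this, List.map_map]
  exact List.map_congr_left (fun k _ => by simp only [Function.comp_apply]; push_cast; ring)

-- ---------- counting lemmas ----------
theorem pvCnt_no_drop (prices : List Int) (p : Int) :
    ∀ l : List Nat, (∀ m ∈ l, p ≤ pvG prices m) → pvCnt prices p l = (l.length : Int)
  | [], _ => rfl
  | j :: rest, h => by
    have hj := h j (by simp)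
    simp only [pvCnt]
    rw [if_neg (not_lt.mpr hj),
      pvCnt_no_drop prices p rest (fun m hm => h m (List.mem_cons_of_mem _ hm))]
    simp only [List.length_cons]
    push_cast; ring

theorem pvCnt_append_no_drop (prices : List Int) (p : Int) :
    ∀ (l1 l2 : List Nat), (∀ m ∈ l1, p ≤ pvG prices m) →
      pvCnt prices p (l1 ++ l2) = (l1.length : Int) + pvCnt prices p l2
  | [], l2, _ => by simp
  | j :: rest, l2, h => by
    have hj := h j (by simp)
    simp only [List.cons_append, pvCnt]
    rw [if_neg (not_lt.mpr hj),
      pvCnt_append_no_drop prices p rest l2 (fun m hm => h m (List.mem_cons_of_mem _ hm))]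
    simp only [List.length_cons]
    push_cast; ring

theorem pvOk_mem (prices : List Int) {t j m : Nat} (h : pvOk prices t j = true)
    (h1 : t < m) (h2 : m < j) : pvG prices t ≤ pvG prices m := by
  have := List.all_eq_true.mp h m (by rw [List.mem_range'_1]; omega)
  exact of_decide_eq_true this

theorem pvF_of_drop (prices : List Int) {t j : Nat} (ht : t < j) (hj : j < prices.length)
    (hok : pvOk prices t j = true) (hd : pvG prices t > pvG prices j) :
    pvF prices t = (j : Int) - (t : Int) := by
  unfold pvF
  have hsplit : List.range' (t + 1) (prices.length - (t + 1)) =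
      List.range' (t + 1) (j - (t + 1)) ++ List.range' j (prices.length - j) := by
    have h0 := @List.range'_append (t + 1) (j - (t + 1)) (prices.length - j) 1
    simp only [one_mul] at h0
    rw [show (t + 1) + (j - (t + 1)) = j from by omega,
      show (j - (t + 1)) + (prices.length - j) = prices.length - (t + 1) from by omega] at h0
    exact h0.symm
  rw [hsplit, pvCnt_append_no_drop prices _ _ _ (fun m hm => by
    rw [List.mem_range'_1] at hm
    exact pvOk_mem prices hok (by omega) (by omega))]
  have hcons : List.range' j (prices.length - j) = j :: List.range' (j + 1) (prices.length - j - 1) := by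
    conv_lhs => rw [show prices.length - j = (prices.length - j - 1) + 1 from by omega]
    rw [List.range'_succ]
  rw [hcons]
  simp only [pvCnt, if_pos hd, List.length_range']
  omega

theorem pvF_of_ok_all (prices : List Int) {t : Nat} (ht : t < prices.length)
    (hok : pvOk prices t prices.length = true) :
    pvF prices t = (prices.length : Int) - 1 - (t : Int) := by
  unfold pvF
  rw [pvCnt_no_drop prices _ _ (fun m hm => by
    rw [List.mem_range'_1] at hm
    exact pvOk_mem prices hok (by omega) (by omega))]
  simp only [List.length_range']
  omega

-- ---------- A side ----------
theorem pvInnerA_eq (prices : List Int) (k : Nat) :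
    ∀ (js : List Nat) (answer : List Int), js ≠ [] → k < answer.length →
      solutionInnerA prices (k : Int) answer (js.map (fun t : Nat => (t : Int))) =
        answer.set k (answer.getD k 0 + pvCnt prices (pvG prices k) js)
  | [], _, hne, _ => absurd rfl hne
  | j :: rest, answer, _, hk => by
    simp only [List.map_cons, solutionInnerA, PySem.List.pySetD_natCast,
      PySem.List.pyGetD_natCast]
    by_cases hd : prices.getD k 0 > prices.getD j 0
    · rw [if_pos hd]
      simp only [pvCnt, pvG]
      rw [if_pos hd]
    · rw [if_neg hd]
      rcases rest with _ | ⟨r, rest'⟩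
      · simp only [List.map_nil, solutionInnerA, pvCnt, pvG]
        rw [if_neg hd]
        norm_num
      · rw [pvInnerA_eq prices k (r :: rest') _ (by simp) (by simp [hk])]
        rw [List.set_set, pvGetD_set answer k _ hk k, if_pos rfl]
        simp only [pvCnt, pvG]
        rw [if_neg hd]
        ring_nf

theorem pvA_fold (prices : List Int) :
    ∀ c : Nat, c + 1 ≤ prices.length →
      (PySem.List.pyRange 0 (c : Int) 1).foldl
          (fun answer i => solutionInnerA prices i answer
            (PySem.List.pyRange (i + 1) (prices.length : Int) 1))
          (List.replicate prices.length 0) =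
        (List.range prices.length).map (fun t => if t < c then pvF prices t else 0) := by
  intro c
  induction c with
  | zero =>
    intro _
    simp
  | succ c ih =>
    intro hc
    have hcast : ((c + 1 : Nat) : Int) = (c : Int) + 1 := by push_cast; ring
    rw [hcast, PySem.List.pyRange_one_succ_right (by positivity), List.foldl_append,
      ih (by omega)]
    simp only [List.foldl_cons, List.foldl_nil]
    have hr : PySem.List.pyRange ((c : Int) + 1) (prices.length : Int) 1 =
        (List.range' (c + 1) (prices.length - (c + 1))).map (fun t : Nat => (t : Int)) := by
      rw [show ((c : Int) + 1) = ((c + 1 : Nat) : Int) by push_cast; ring, pvPyRange_cast]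
    have hne : List.range' (c + 1) (prices.length - (c + 1)) ≠ [] := by
      simp only [ne_eq, List.range'_eq_nil_iff]; omega
    rw [hr, pvInnerA_eq prices c _ _ hne (by simp; omega)]
    have hgd : ((List.range prices.length).map (fun t => if t < c then pvF prices t else 0)).getD c 0 = 0 := by
      rw [List.getD_eq_getElem?_getD, List.getElem?_map, List.getElem?_range (by omega)]
      simp
    rw [hgd]
    apply List.ext_getElem (by simp)
    intro i h1 h2
    simp only [List.length_map, List.length_range] at h2
    rw [List.getElem_set]
    simp only [List.getElem_map, List.getElem_range]
    by_cases hic : c = i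
    · rw [if_pos hic]
      subst hic
      rw [if_pos (by omega)]
      simp [pvF]
    · rw [if_neg hic]
      by_cases hlt : i < c
      · rw [if_pos hlt, if_pos (by omega)]
      · rw [if_neg hlt, if_neg (by omega)]

theorem pvSetD_neg_one (xs : List Int) (v : Int) (h : xs ≠ []) :
    PySem.List.pySetD xs (-1) v = xs.set (xs.length - 1) v := by
  have hl : xs.length ≠ 0 := by simpa using h
  simp only [PySem.List.pySetD, PySem.List.pySet?, PySem.List.pyIdx?]
  norm_num
  rw [if_pos (by omega)]
  simp

theorem solution_eq_map (prices : List Int) (h : prices ≠ []) :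
    solution prices = (List.range prices.length).map (pvF prices) := by
  have hn : 1 ≤ prices.length := by
    cases prices with | nil => exact absurd rfl h | cons a l => simp
  show PySem.List.pySetD
      ((PySem.List.pyRange 0 ((prices.length : Int) - 1) 1).foldl
        (fun answer i => solutionInnerA prices i answer
          (PySem.List.pyRange (i + 1) (prices.length : Int) 1))
        (List.replicate prices.length 0)) (-1) 0 = _
  have hcast : (prices.length : Int) - 1 = ((prices.length - 1 : Nat) : Int) := by omega
  rw [hcast, pvA_fold prices (prices.length - 1) (by omega)]
  rw [pvSetD_neg_one _ _ (by simp; omega)]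
  apply List.ext_getElem (by simp)
  intro i h1 h2
  simp only [List.length_map, List.length_range] at h2
  rw [List.getElem_set]
  by_cases hi : i = prices.length - 1
  · subst hi
    rw [if_pos (by simp)]
    have : pvF prices (prices.length - 1) = 0 := by
      unfold pvF
      have : prices.length - (prices.length - 1 + 1) = 0 := by omega
      rw [this]
      rfl
    simp [this]
  · rw [if_neg (by simp; omega)]
    simp only [List.getElem_map, List.getElem_range]
    rw [if_pos (by omega)]

-- ---------- B side ----------
-- the monotonic stack after the first j elements (top first, as cast Nat indices)
def pvStack (prices : List Int) (j : Nat) : List Int :=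
  (((List.range j).filter (fun t => pvOk prices t j)).reverse).map (fun t : Nat => (t : Int))

-- the answer list after the first j elements
def pvAns (prices : List Int) (j : Nat) : List Int :=
  (List.range prices.length).map
    (fun t => if t < j ∧ pvOk prices t j = false then pvF prices t else 0)

theorem pvPopLoop_eq (prices : List Int) (j p : Int) (st : List Int) : ∀ (answer : List Int),
    popLoopB prices j p answer st =
      ((st.takeWhile (fun t => decide (PySem.List.pyGetD prices t 0 > p))).foldl
          (fun a t => PySem.List.pySetD a t (j - t)) answer,
        st.dropWhile (fun t => decide (PySem.List.pyGetD prices t 0 > p))) := by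
  induction st with
  | nil => intro answer; rfl
  | cons t st' ih =>
    intro answer
    by_cases hc : PySem.List.pyGetD prices t 0 > p
    · simp [popLoopB, hc, ih]
    · simp [popLoopB, hc]

theorem pvFoldSet_length (v : Int → Int) (l : List Int) : ∀ (answer : List Int),
    (l.foldl (fun a t => PySem.List.pySetD a t (v t)) answer).length = answer.length := by
  induction l with
  | nil => intro answer; rfl
  | cons t l ih => intro answer; rw [List.foldl_cons, ih, PySem.List.length_pySetD]

theorem pvFoldSet_getD (v : Int → Int) :
    ∀ (l : List Nat) (answer : List Int), (∀ t ∈ l, t < answer.length) → ∀ s : Nat,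
      ((l.map (fun t : Nat => (t : Int))).foldl
          (fun a t => PySem.List.pySetD a t (v t)) answer).getD s 0 =
        if s ∈ l then v (s : Int) else answer.getD s 0
  | [], answer, _, s => by simp
  | t :: l, answer, h, s => by
    simp only [List.map_cons, List.foldl_cons, PySem.List.pySetD_natCast]
    rw [pvFoldSet_getD v l (answer.set t (v t))
      (fun x hx => by rw [List.length_set]; exact h x (List.mem_cons_of_mem _ hx)) s]
    by_cases hmem : s ∈ l
    · rw [if_pos hmem, if_pos (List.mem_cons_of_mem _ hmem)]
    · rw [if_neg hmem, pvGetD_set answer t (v t) (h t (by simp)) s]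
      by_cases hst : s = t
      · subst hst; rw [if_pos rfl, if_pos (by simp)]
      · rw [if_neg hst, if_neg (by simp [hst, hmem])]

theorem pvOk_succ (prices : List Int) (t j : Nat) (ht : t < j) :
    pvOk prices t (j + 1) = (pvOk prices t j && decide (pvG prices t ≤ pvG prices j)) := by
  unfold pvOk
  conv_lhs => rw [show (j + 1) - (t + 1) = (j - (t + 1)) + 1 from by omega]
  rw [List.range'_1_concat, List.all_append,
    show (t + 1) + (j - (t + 1)) = j from by omega]
  simp

theorem pvOk_self_succ (prices : List Int) (j : Nat) : pvOk prices j (j + 1) = true := by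
  unfold pvOk
  simp

-- on a list where the predicate only gets (weakly) truer towards the head,
-- takeWhile is filter and dropWhile is the co-filter
theorem pvTakeDrop_filter {α : Type} (cond : α → Bool) :
    ∀ l : List α, l.Pairwise (fun a b => cond b = true → cond a = true) →
      l.takeWhile cond = l.filter cond ∧ l.dropWhile cond = l.filter (fun x => !cond x)
  | [], _ => ⟨rfl, rfl⟩
  | x :: l, h => by
    rcases List.pairwise_cons.mp h with ⟨hx, hl⟩
    rcases pvTakeDrop_filter cond l hl with ⟨h1, h2⟩
    by_cases hc : cond x = true
    · simp [List.takeWhile_cons, List.dropWhile_cons, List.filter_cons, hc, h1, h2]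
    · have hnone : ∀ y ∈ l, ¬ cond y = true := fun y hy hcy => hc (hx y hy hcy)
      have hb : cond x = false := by revert hc; cases cond x <;> simp
      have hfn : ∀ y ∈ l, (!cond y) = true := fun y hy => by
        have := hnone y hy
        cases hcy : cond y
        · simp
        · exact absurd hcy this
      constructor
      · rw [List.takeWhile_cons_of_neg (by simp [hb]), List.filter_cons_of_neg (by simp [hb]),
          List.filter_eq_nil_iff.mpr hnone]
      · rw [List.dropWhile_cons_of_neg (by simp [hb]), List.filter_cons_of_pos (by simp [hb]),
          List.filter_eq_self.mpr hfn]

theorem pvStack_pairwise (prices : List Int) (j : Nat) (hj : j ≤ prices.length) (p : Int) :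
    (((List.range j).filter (fun t => pvOk prices t j)).reverse).Pairwise
      (fun a b => decide (pvG prices b > p) = true → decide (pvG prices a > p) = true) := by
  rw [List.pairwise_reverse]
  have hlt : ((List.range j).filter (fun t => pvOk prices t j)).Pairwise (· < ·) :=
    List.Pairwise.sublist List.filter_sublist List.pairwise_lt_range
  refine List.Pairwise.imp_of_mem ?_ hlt
  intro a b ha hb hab
  have hoka : pvOk prices a j = true := (List.mem_filter.mp ha).2
  have hbj : b < j := List.mem_range.mp (List.mem_filter.mp hb).1
  have hle : pvG prices a ≤ pvG prices b := pvOk_mem prices hoka hab hbj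
  intro hbp
  have := of_decide_eq_true hbp
  exact decide_eq_true (by omega)

-- one step of B's fold
theorem pvB_step (prices : List Int) (j : Nat) (hlt : j < prices.length) :
    (fun (st : List Int × List Int) (jp : Int × Int) =>
        let st' := popLoopB prices jp.1 jp.2 st.1 st.2
        (st'.1, jp.1 :: st'.2)) (pvAns prices j, pvStack prices j) ((j : Int), prices[j]) =
      (pvAns prices (j + 1), pvStack prices (j + 1)) := by
  have hpj : pvG prices j = prices[j] :=
    List.getD_eq_getElem prices 0 hlt
  simp only
  rw [pvPopLoop_eq]
  -- rewrite cond over the cast list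
  have hmapTake : ∀ q : Int → Bool, (pvStack prices j).takeWhile q =
      ((((List.range j).filter (fun t => pvOk prices t j)).reverse).takeWhile
        (fun t : Nat => q (t : Int))).map (fun t : Nat => (t : Int)) := by
    intro q; unfold pvStack; rw [List.takeWhile_map]; rfl
  have hmapDrop : ∀ q : Int → Bool, (pvStack prices j).dropWhile q =
      ((((List.range j).filter (fun t => pvOk prices t j)).reverse).dropWhile
        (fun t : Nat => q (t : Int))).map (fun t : Nat => (t : Int)) := by
    intro q; unfold pvStack; rw [List.dropWhile_map]; rfl
  have hcond : (fun t : Nat => decide (PySem.List.pyGetD prices (t : Int) 0 > prices[j])) =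
      (fun t : Nat => decide (pvG prices t > pvG prices j)) := by
    funext t
    rw [PySem.List.pyGetD_natCast, hpj]
    rfl
  have hpw := pvStack_pairwise prices j (by omega) (pvG prices j)
  rcases pvTakeDrop_filter _ _ hpw with ⟨htw, hdw⟩
  dsimp only
  have hfilter_succ : (List.range j).filter (fun t => pvOk prices t (j + 1)) =
      ((List.range j).filter (fun t => pvOk prices t j)).filter
        (fun t => !decide (pvG prices t > pvG prices j)) := by
    rw [List.filter_filter]
    refine List.filter_congr ?_
    intro t htm
    have htj : t < j := List.mem_range.mp htm
    rw [pvOk_succ prices t j htj]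
    have hdec : (!decide (pvG prices t > pvG prices j)) = decide (pvG prices t ≤ pvG prices j) := by
      rw [← decide_not]
      simp [not_lt]
    rw [hdec, Bool.and_comm]
  simp only [Prod.mk.injEq]
  refine ⟨?_, ?_⟩
  · -- answer component
    have hlen : ∀ l : List Int, (l.foldl
        (fun a t => PySem.List.pySetD a t ((j : Int) - t)) (pvAns prices j)).length = prices.length := by
      intro l
      rw [pvFoldSet_length (fun t => (j : Int) - t) l (pvAns prices j)]
      simp [pvAns]
    apply List.ext_getElem (by rw [hlen]; simp [pvAns])
    intro s h1 h2
    rw [← List.getD_eq_getElem _ 0 h1, ← List.getD_eq_getElem _ 0 h2]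
    have hs : s < prices.length := by rw [hlen] at h1; omega
    rw [hmapTake, hcond, htw, List.filter_reverse,
      pvFoldSet_getD (fun t => (j : Int) - t) _ (pvAns prices j)
        (fun t ht => by
          have := List.mem_range.mp (List.mem_filter.mp
            (List.mem_filter.mp ((List.mem_reverse).mp ht)).1).1
          simp only [pvAns, List.length_map, List.length_range]
          omega) s]
    have hRHS : (pvAns prices (j + 1)).getD s 0 =
        if s < j + 1 ∧ pvOk prices s (j + 1) = false then pvF prices s else 0 := by
      unfold pvAns
      rw [List.getD_eq_getElem _ 0 (by simp; omega)]
      simp [hs]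
    have hLHS0 : (pvAns prices j).getD s 0 =
        if s < j ∧ pvOk prices s j = false then pvF prices s else 0 := by
      unfold pvAns
      rw [List.getD_eq_getElem _ 0 (by simp; omega)]
      simp [hs]
    rw [hRHS, hLHS0]
    by_cases hmem : s ∈ (((List.range j).filter (fun t => pvOk prices t j)).filter
        (fun t => decide (pvG prices t > pvG prices j))).reverse
    · rw [if_pos hmem]
      rw [List.mem_reverse, List.mem_filter, List.mem_filter, List.mem_range] at hmem
      rcases hmem with ⟨⟨hsj, hok⟩, hdrop⟩
      have hdrop' : pvG prices s > pvG prices j := of_decide_eq_true hdrop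
      rw [if_pos ⟨by omega, by rw [pvOk_succ prices s j hsj, hok]; simp [not_le.mpr hdrop']⟩]
      rw [pvF_of_drop prices hsj hlt hok hdrop']
    · rw [if_neg hmem]
      rw [List.mem_reverse, List.mem_filter, List.mem_filter, List.mem_range] at hmem
      by_cases hsj : s < j
      · by_cases hok : pvOk prices s j = true
        · -- in the old stack; not popped, so price did not drop
          have hnd : ¬ pvG prices s > pvG prices j := fun hgt =>
            hmem ⟨⟨hsj, hok⟩, decide_eq_true hgt⟩
          rw [if_neg (by simp [hok]), if_neg (by
            rw [pvOk_succ prices s j hsj, hok]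
            simp [not_lt.mp hnd])]
        · have hok' : pvOk prices s j = false := by revert hok; cases pvOk prices s j <;> simp
          rw [if_pos ⟨hsj, hok'⟩, if_pos ⟨by omega, by rw [pvOk_succ prices s j hsj, hok']; simp⟩]
      · by_cases hsj1 : s = j
        · subst hsj1
          rw [if_neg (by omega), if_neg (by rw [pvOk_self_succ]; simp)]
        · rw [if_neg (by omega), if_neg (by omega)]
  · -- stack component
    rw [hmapDrop, hcond, hdw, List.filter_reverse]
    unfold pvStack
    rw [List.range_succ, List.filter_append, List.filter_cons, List.filter_nil,
      if_pos (by rw [pvOk_self_succ]), List.reverse_append, hfilter_succ]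
    simp

theorem pvB_inv (prices : List Int) : ∀ j : Nat, j ≤ prices.length →
    ((PySem.List.enumerate prices 0).take j).foldl
        (fun (st : List Int × List Int) jp =>
          let st' := popLoopB prices jp.1 jp.2 st.1 st.2
          (st'.1, jp.1 :: st'.2))
        (List.replicate prices.length 0, []) =
      (pvAns prices j, pvStack prices j) := by
  intro j
  induction j with
  | zero =>
    intro _
    simp only [List.take_zero, List.foldl_nil, pvAns, pvStack, Prod.mk.injEq]
    refine ⟨?_, ?_⟩
    · simp only [Nat.not_lt_zero, false_and, if_false]
      rw [List.map_const']
      simp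
    · simp
  | succ j ih =>
    intro hj
    have hlt : j < prices.length := by omega
    have htake : (PySem.List.enumerate prices 0).take (j + 1) =
        (PySem.List.enumerate prices 0).take j ++ [((j : Int), prices[j])] := by
      rw [List.take_succ]
      congr 1
      rw [PySem.List.getElem?_enumerate, List.getElem?_eq_getElem hlt]
      simp
    rw [htake, List.foldl_append, ih (by omega)]
    simp only [List.foldl_cons, List.foldl_nil]
    exact pvB_step prices j hlt

theorem solution_alt_eq_map (prices : List Int) :
    solution_alt prices = (List.range prices.length).map (pvF prices) := by
  show ((PySem.List.enumerate prices 0).foldl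
      (fun (st : List Int × List Int) jp =>
        let st' := popLoopB prices jp.1 jp.2 st.1 st.2
        (st'.1, jp.1 :: st'.2))
      (List.replicate prices.length 0, [])).2.reverse.foldl
        (fun answer t => PySem.List.pySetD answer t ((prices.length : Int) - 1 - t))
        ((PySem.List.enumerate prices 0).foldl
          (fun (st : List Int × List Int) jp =>
            let st' := popLoopB prices jp.1 jp.2 st.1 st.2
            (st'.1, jp.1 :: st'.2))
          (List.replicate prices.length 0, [])).1 = _
  have hfull : PySem.List.enumerate prices 0 =
      (PySem.List.enumerate prices 0).take prices.length := by
    rw [← PySem.List.length_enumerate prices 0, List.take_length]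
  rw [hfull, pvB_inv prices prices.length le_rfl]
  dsimp only
  unfold pvStack
  have hrev : ((((List.range prices.length).filter (fun t => pvOk prices t prices.length)).reverse).map
      (fun t : Nat => (t : Int))).reverse =
      ((List.range prices.length).filter (fun t => pvOk prices t prices.length)).map
        (fun t : Nat => (t : Int)) := by
    simp
  rw [hrev]
  apply List.ext_getElem (by rw [pvFoldSet_length]; simp [pvAns])
  intro s h1 h2
  have hs : s < prices.length := by simpa using h2
  rw [← List.getD_eq_getElem _ 0 h1,
    pvFoldSet_getD (fun t => (prices.length : Int) - 1 - t) _ (pvAns prices prices.length)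
      (fun t ht => by
        have := List.mem_range.mp (List.mem_filter.mp ht).1
        simp only [pvAns, List.length_map, List.length_range]
        omega) s]
  simp only [List.getElem_map, List.getElem_range]
  by_cases hmem : s ∈ (List.range prices.length).filter (fun t => pvOk prices t prices.length)
  · rw [if_pos hmem]
    exact (pvF_of_ok_all prices hs (List.mem_filter.mp hmem).2).symm
  · rw [if_neg hmem]
    have hok : pvOk prices s prices.length = false := by
      cases hcy : pvOk prices s prices.length
      · rfl
      · exact absurd (List.mem_filter.mpr ⟨List.mem_range.mpr hs, hcy⟩) hmem
    unfold pvAns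
    rw [List.getD_eq_getElem _ 0 (by simp [hs])]
    simp [hs, hok]

-- ===== VERDICT (by name: the statement is the Claim_ definition above) =====
theorem solution_spec : Claim_equal_solution := by
  intro prices _ hpre
  unfold Spec_solution
  rw [solution_eq_map prices hpre, solution_alt_eq_map prices]
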